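-- pv_equiv track=rewrite | github.com/Joe-Lonsdale/advent-of-code-2024 | day9/main.py | get_earliest_free_space
-- ===== SOURCE A (Python) =====
-- def get_earliest_free_space(disk_layout, known_earliest, length=1):
--     for i in range(known_earliest, len(disk_layout)):
--         if disk_layout[i] == '.':
--             found = True
--             for j in range(length):
--                 if i + j >= len(disk_layout):
--                     found = False
--                     break
--                 if disk_layout[i+j] != '.':
--                     found = False
--                     break
--             if found: return i
--     return -1
-- ===== SOURCE B (Python) =====
-- def get_earliest_free_space(disk_layout, known_earliest, length=1):
--     # Single pass from the start index, counting the current run of consecutive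
--     # free cells; the window completes as soon as the run reaches the needed size.
--     need = max(length, 1)
--     run = 0
--     for i in range(max(known_earliest, 0), len(disk_layout)):
--         if disk_layout[i] == '.':
--             run += 1
--             if run == need:
--                 return i - need + 1
--         else:
--             run = 0
--     return -1
-- ===== Notes on version B (the rewrite author's own statement) =====
-- stated objective: alternative
-- what changed: Replaces the nested rescan of each candidate window with a single left-to-right pass that counts the current run of consecutive free cells and returns as soon as the run reaches the needed length.
-- outside the precondition, e.g. on get_earliest_free_space(['.'], -1, 1): A returns -1, B returns 0
-- crash fix: For known_earliest < -len(disk_layout) A raises IndexError on the first (out-of-range negative) index; B starts at max(known_earliest, 0) and returns the normal search result (-1 on the witness). — e.g. on get_earliest_free_space([], -1, 1): A raises IndexError, B returns -1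
import Mathlib
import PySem

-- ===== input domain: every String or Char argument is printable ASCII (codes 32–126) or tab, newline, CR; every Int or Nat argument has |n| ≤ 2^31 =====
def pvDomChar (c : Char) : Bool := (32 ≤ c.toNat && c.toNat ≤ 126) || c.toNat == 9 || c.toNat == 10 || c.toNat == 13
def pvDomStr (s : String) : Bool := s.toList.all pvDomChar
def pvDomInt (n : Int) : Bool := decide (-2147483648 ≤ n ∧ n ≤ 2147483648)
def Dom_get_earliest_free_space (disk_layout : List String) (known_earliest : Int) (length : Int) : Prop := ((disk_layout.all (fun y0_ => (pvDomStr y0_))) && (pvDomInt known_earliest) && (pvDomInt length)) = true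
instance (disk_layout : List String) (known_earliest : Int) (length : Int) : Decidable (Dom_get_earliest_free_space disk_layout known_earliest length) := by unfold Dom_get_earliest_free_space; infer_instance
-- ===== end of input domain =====

-- B replaces A's per-candidate window rescan by a single pass that counts the
-- current run of consecutive free cells (objective: alternative).

-- ===== PORT A =====
-- inner 'for j in range(length)' loop: returns the final value of 'found'
def pvAInner (disk_layout : List String) (i : Int) (js : List Int) : Bool :=
  match js with
  | [] => true
  | j :: rest =>
    if i + j ≥ (disk_layout.length : Int) then false
    else if ((PySem.List.pyGet? disk_layout (i + j)).getD "") ≠ "." then false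
    else pvAInner disk_layout i rest

-- outer 'for i in range(known_earliest, len(disk_layout))' loop with early return
def pvAOuter (disk_layout : List String) (length : Int) (is_ : List Int) : Int :=
  match is_ with
  | [] => -1
  | i :: rest =>
    if ((PySem.List.pyGet? disk_layout i).getD "") = "." then
      if pvAInner disk_layout i (PySem.List.pyRange 0 length 1) then i
      else pvAOuter disk_layout length rest
    else pvAOuter disk_layout length rest

def get_earliest_free_space (disk_layout : List String) (known_earliest : Int) (length : Int) : Int :=
  pvAOuter disk_layout length (PySem.List.pyRange known_earliest (disk_layout.length : Int) 1)

-- ===== PORT B =====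
-- single pass with the run counter; returns i - need + 1 when the run completes
def pvBLoop (disk_layout : List String) (need : Int) (run : Int) (is_ : List Int) : Int :=
  match is_ with
  | [] => -1
  | i :: rest =>
    if ((PySem.List.pyGet? disk_layout i).getD "") = "." then
      if run + 1 = need then i - need + 1
      else pvBLoop disk_layout need (run + 1) rest
    else pvBLoop disk_layout need 0 rest

def get_earliest_free_space_alt (disk_layout : List String) (known_earliest : Int) (length : Int) : Int :=
  pvBLoop disk_layout (max length 1) 0
    (PySem.List.pyRange (max known_earliest 0) (disk_layout.length : Int) 1)

-- ===== PRECONDITION & SPEC =====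
-- Pre_ excludes negative known_earliest, which is outside the natural domain of a start
-- index: there A raises IndexError (known_earliest < -len) or scans via Python's
-- negative-index wraparound (see the cited excluded example); B searches from index 0.
def Pre_get_earliest_free_space (disk_layout : List String) (known_earliest : Int) (length : Int) : Prop :=
  0 ≤ known_earliest

instance (disk_layout : List String) (known_earliest : Int) (length : Int) : Decidable (Pre_get_earliest_free_space disk_layout known_earliest length) := by unfold Pre_get_earliest_free_space; infer_instance

def pvWitness_get_earliest_free_space : List String × Int × Int := (["0", ".", ".", "1"], 0, 2)

-- A raises IndexError exactly when known_earliest < -len(disk_layout); B returns the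
-- normal search result there (-1 at the witness).
def Raises_get_earliest_free_space (disk_layout : List String) (known_earliest : Int) (length : Int) : Prop :=
  known_earliest < -(disk_layout.length : Int)

instance (disk_layout : List String) (known_earliest : Int) (length : Int) : Decidable (Raises_get_earliest_free_space disk_layout known_earliest length) := by unfold Raises_get_earliest_free_space; infer_instance

def pvRaiseWitness_get_earliest_free_space : List String × Int × Int := ([], -1, 1)
def pvRaiseWitnessOut_get_earliest_free_space : Int := -1

def Spec_get_earliest_free_space (disk_layout : List String) (known_earliest : Int) (length : Int) (out : Int) : Prop := out = get_earliest_free_space_alt disk_layout known_earliest length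
instance (disk_layout : List String) (known_earliest : Int) (length : Int) (out : Int) : Decidable (Spec_get_earliest_free_space disk_layout known_earliest length out) := by unfold Spec_get_earliest_free_space; infer_instance

-- ===== CLAIM (what is proved, stated in full; the proofs are below) =====
def Claim_equal_get_earliest_free_space : Prop := ∀ (disk_layout : List String) (known_earliest : Int) (length : Int), Dom_get_earliest_free_space disk_layout known_earliest length → Pre_get_earliest_free_space disk_layout known_earliest length → Spec_get_earliest_free_space disk_layout known_earliest length (get_earliest_free_space disk_layout known_earliest length)

def Claim_raises_get_earliest_free_space : Prop := (∀ (disk_layout : List String) (known_earliest : Int) (length : Int), Dom_get_earliest_free_space disk_layout known_earliest length → Raises_get_earliest_free_space disk_layout known_earliest length → ¬ Pre_get_earliest_free_space disk_layout known_earliest length) ∧ (Dom_get_earliest_free_space (pvRaiseWitness_get_earliest_free_space.1) (pvRaiseWitness_get_earliest_free_space.2.1) (pvRaiseWitness_get_earliest_free_space.2.2) ∧ Raises_get_earliest_free_space (pvRaiseWitness_get_earliest_free_space.1) (pvRaiseWitness_get_earliest_free_space.2.1) (pvRaiseWitness_get_earliest_free_space.2.2) ∧ get_earliest_free_space_alt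 (pvRaiseWitness_get_earliest_free_space.1) (pvRaiseWitness_get_earliest_free_space.2.1) (pvRaiseWitness_get_earliest_free_space.2.2) = pvRaiseWitnessOut_get_earliest_free_space)

-- ===== LEMMAS AND PROOFS =====

-- cell i is a free cell '.'
def pvDot (disk_layout : List String) (i : Int) : Prop :=
  ((PySem.List.pyGet? disk_layout i).getD "") = "."

-- the inner loop succeeds iff the whole window is free and in range
lemma pvAInner_iff (disk_layout : List String) (i : Int) (b : Int) :
    ∀ (m : Nat) (a : Int), (b - a).toNat = m →
      (pvAInner disk_layout i (PySem.List.pyRange a b 1) = true ↔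
        ∀ j : Int, a ≤ j → j < b →
          (i + j < (disk_layout.length : Int) ∧ pvDot disk_layout (i + j))) := by
  intro m
  induction m with
  | zero =>
    intro a hm
    rw [PySem.List.pyRange_one_eq_nil (by omega)]
    simp only [pvAInner, true_iff]
    intro j hj1 hj2; omega
  | succ m ih =>
    intro a hm
    rw [PySem.List.pyRange_one_cons (by omega)]
    simp only [pvAInner]
    split_ifs with h1 h2
    · simp only [false_iff]
      intro h
      exact absurd ((h a le_rfl (by omega)).1) (by omega)
    · simp only [false_iff]
      intro h
      exact h2 ((h a le_rfl (by omega)).2)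
    · rw [ih (a + 1) (by omega)]
      constructor
      · intro h j hj1 hj2
        by_cases hja : a + 1 ≤ j
        · exact h j hja hj2
        · have hj : j = a := by omega
          subst hj
          exact ⟨by omega, by exact not_ne_iff.mp h2⟩
      · intro h j hj1 hj2
        exact h j (by omega) hj2
    
-- a stretch of candidates whose windows all fail is skipped by the outer loop
lemma pvAOuter_skip (disk_layout : List String) (length : Int) (b : Int) :
    ∀ (m : Nat) (a : Int), (b - a).toNat = m → a ≤ b →
      (∀ c : Int, a ≤ c → c < b →
        (¬ pvDot disk_layout c ∨ pvAInner disk_layout c (PySem.List.pyRange 0 length 1) = false)) →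
      pvAOuter disk_layout length (PySem.List.pyRange a (disk_layout.length : Int) 1) =
      pvAOuter disk_layout length (PySem.List.pyRange b (disk_layout.length : Int) 1) := by
  intro m
  induction m with
  | zero =>
    intro a hm hab _
    have : a = b := by omega
    rw [this]
  | succ m ih =>
    intro a hm hab hfail
    by_cases halen : a < (disk_layout.length : Int)
    · rw [PySem.List.pyRange_one_cons halen]
      simp only [pvAOuter]
      have hrest := ih (a + 1) (by omega) (by omega) (fun c h1 h2 => hfail c (by omega) h2)
      split_ifs with hd hi
      · rcases hfail a le_rfl (by omega) with hnd | hinf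
        · exact absurd hd hnd
        · rw [hinf] at hi; exact absurd hi (by simp)
      · exact hrest
      · exact hrest
    · rw [PySem.List.pyRange_one_eq_nil (by omega),
          PySem.List.pyRange_one_eq_nil (by omega)]

-- the run-counting invariant: with r consecutive free cells just before index i,
-- B's loop from i computes what A's loop computes from i - r
lemma pvMain (disk_layout : List String) (length : Int) :
    ∀ (m : Nat) (i r : Int), (((disk_layout.length : Int)) - i).toNat = m →
      0 ≤ r → r ≤ i → i ≤ (disk_layout.length : Int) → r < max length 1 →
      (∀ t : Int, i - r ≤ t → t < i → pvDot disk_layout t) →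
      pvBLoop disk_layout (max length 1) r (PySem.List.pyRange i (disk_layout.length : Int) 1) =
      pvAOuter disk_layout length (PySem.List.pyRange (i - r) (disk_layout.length : Int) 1) := by
  intro m
  induction m with
  | zero =>
    intro i r hm hr0 hri hin hrneed hdots
    rw [PySem.List.pyRange_one_eq_nil (by omega)]
    rw [pvAOuter_skip disk_layout length (disk_layout.length : Int)
          (((disk_layout.length : Int)) - (i - r)).toNat (i - r) rfl (by omega) ?_]
    · rw [PySem.List.pyRange_one_eq_nil (by omega)]; rfl
    · intro c hc1 hc2
      right
      cases h : pvAInner disk_layout c (PySem.List.pyRange 0 length 1) with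
      | false => rfl
      | true =>
        exfalso
        have := ((pvAInner_iff disk_layout c length (length - 0).toNat 0 rfl).mp h
          ((disk_layout.length : Int) - c) (by omega) (by omega)).1
        omega
  | succ m ih =>
    intro i r hm hr0 hri hin hrneed hdots
    have hilt : i < (disk_layout.length : Int) := by omega
    rw [PySem.List.pyRange_one_cons hilt]
    simp only [pvBLoop]
    by_cases hdot : ((PySem.List.pyGet? disk_layout i).getD "") = "."
    · rw [if_pos hdot]
      by_cases hfin : r + 1 = max length 1
      · rw [if_pos hfin]
        rw [PySem.List.pyRange_one_cons (by omega)]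
        simp only [pvAOuter]
        have hd : ((PySem.List.pyGet? disk_layout (i - r)).getD "") = "." := by
          by_cases h0 : r = 0
          · rw [show i - r = i from by omega]; exact hdot
          · exact hdots (i - r) le_rfl (by omega)
        rw [if_pos hd, if_pos ?_]
        · omega
        · rw [pvAInner_iff disk_layout (i - r) length (length - 0).toNat 0 rfl]
          intro j hj0 hjl
          refine ⟨by omega, ?_⟩
          by_cases hji : i - r + j < i
          · exact hdots _ (by omega) hji
          · rw [show i - r + j = i from by omega]; exact hdot
      · rw [if_neg hfin]
        have hB := ih (i + 1) (r + 1) (by omega) (by omega) (by omega) (by omega) (by omega)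
          (fun t ht1 ht2 => by
            by_cases hti : t < i
            · exact hdots t (by omega) hti
            · rw [show t = i from by omega]; exact hdot)
        rw [show i + 1 - (r + 1) = i - r from by ring] at hB
        exact hB
    · rw [if_neg hdot]
      have hB := ih (i + 1) 0 (by omega) le_rfl (by omega) (by omega) (by omega)
        (fun t ht1 ht2 => absurd ht2 (by omega))
      rw [show i + 1 - (0 : Int) = i + 1 from by ring] at hB
      rw [hB]
      rw [pvAOuter_skip disk_layout length (i + 1) ((i + 1 - (i - r)).toNat) (i - r) rfl
            (by omega) ?_]
      intro c hc1 hc2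
      by_cases hc : c = i
      · left; rw [hc]; exact hdot
      · right
        cases h : pvAInner disk_layout c (PySem.List.pyRange 0 length 1) with
        | false => rfl
        | true =>
          exfalso
          have := ((pvAInner_iff disk_layout c length (length - 0).toNat 0 rfl).mp h
            (i - c) (by omega) (by omega)).2
          rw [show c + (i - c) = i from by ring] at this
          exact hdot this

-- ===== VERDICT (by name: the statement is the Claim_ definition above) =====
theorem get_earliest_free_space_spec : Claim_equal_get_earliest_free_space := by
  intro dl k l _ hpre
  unfold Spec_get_earliest_free_space get_earliest_free_space get_earliest_free_space_alt
  have hpre' : 0 ≤ k := hpre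
  rw [show max k 0 = k from by omega]
  by_cases hk : k ≤ (dl.length : Int)
  · have h := pvMain dl l (((dl.length : Int)) - k).toNat k 0 rfl le_rfl (by omega) hk
      (by omega) (fun t h1 h2 => absurd h2 (by omega))
    rw [show k - (0 : Int) = k from by ring] at h
    exact h.symm
  · rw [PySem.List.pyRange_one_eq_nil (by omega)]
    rfl

@[simp]
theorem get_earliest_free_space_raises : Claim_raises_get_earliest_free_space := by
  unfold Claim_raises_get_earliest_free_space
  exact ⟨fun dl k l _ hr hp => by
    unfold Raises_get_earliest_free_space at hr
    unfold Pre_get_earliest_free_space at hp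
    omega, by decide⟩
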